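-- pv_equiv track=rewrite | github.com/fantasiiio/GPT-Games | Tactic/packing.py | arrange_boxes_next_fit
-- ===== SOURCE A (Python) =====
-- def arrange_boxes_next_fit(container_width, container_height, boxes):
--     # Sorting boxes by height
--     boxes = sorted(boxes, key=lambda x: x[1], reverse=True)
--
--     # Starting position
--     x, y = 0, 0
--
--     # Current max height in this row
--     current_row_max_height = 0
--
--     positions = []
--
--     for box in boxes:
--         width, height = box
--
--         # Check if the box fits at the current position
--         if x + width <= container_width:
--             positions.append((x, y))
--             x += width
--             current_row_max_height = max(current_row_max_height, height)
--         else: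
--             # Move to the next row
--             x = 0
--             y += current_row_max_height
--
--             if y + height > container_height:
--                 raise ValueError("Box doesn't fit in the container!")
--
--             positions.append((x, y))
--             x += width
--             current_row_max_height = height
--
--     return positions
-- ===== SOURCE B (Python) =====
-- def arrange_boxes_next_fit(container_width, container_height, boxes):
--     # Shelf-by-shelf layout: repeatedly peel one shelf (the head box plus as
--     # many following boxes as still fit the width) off the height-sorted list,
--     # then drop down by the shelf's height before opening the next shelf.
--     remaining = sorted(boxes, key=lambda b: b[1], reverse=True)
--     positions = []
--     y = 0
--     while remaining:
--         x = 0
--         i = 0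
--         while i == 0 or (i < len(remaining) and x + remaining[i][0] <= container_width):
--             positions.append((x, y))
--             x += remaining[i][0]
--             i += 1
--         shelf_height = max(h for _, h in remaining[:i])
--         remaining = remaining[i:]
--         if remaining:
--             y += shelf_height
--             if y + remaining[0][1] > container_height:
--                 raise ValueError("Box doesn't fit in the container!")
--     return positions
-- ===== Notes on version B (the rewrite author's own statement) =====
-- stated objective: alternative
-- what changed: A's single flat loop over boxes with running (x, y, row-max) state is replaced by a shelf-peeling loop: repeatedly cut one width-fitting shelf off the front of the height-sorted list, emit its positions, and drop y by the shelf's max height; Pre_ excludes inputs where A raises ValueError and, as outside the natural domain of box dimensions, nonempty lists in which every box height is negative, where A's first-row height is clamped to 0 by its accumulator's initial value.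
-- outside the precondition, e.g. on arrange_boxes_next_fit(4, 10, [(3, -5), (3, -7)]): A returns [(0, 0), (0, 0)], B returns [(0, 0), (0, -5)]
import Mathlib
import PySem

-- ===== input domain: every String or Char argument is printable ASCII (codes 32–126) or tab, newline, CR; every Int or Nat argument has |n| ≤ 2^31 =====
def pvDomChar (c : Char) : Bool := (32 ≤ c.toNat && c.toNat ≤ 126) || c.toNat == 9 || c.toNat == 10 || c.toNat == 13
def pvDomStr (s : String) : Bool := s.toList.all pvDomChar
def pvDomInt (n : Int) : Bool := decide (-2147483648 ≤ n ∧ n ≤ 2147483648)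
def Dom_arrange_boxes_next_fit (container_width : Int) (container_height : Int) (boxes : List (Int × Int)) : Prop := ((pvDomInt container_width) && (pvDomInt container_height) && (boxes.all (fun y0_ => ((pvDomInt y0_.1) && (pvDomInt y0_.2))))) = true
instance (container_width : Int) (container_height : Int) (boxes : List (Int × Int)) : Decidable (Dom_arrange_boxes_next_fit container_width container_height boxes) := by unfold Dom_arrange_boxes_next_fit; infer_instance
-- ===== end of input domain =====

-- B replaces A's single flat loop over boxes (running x, y, row-max state) by a shelf-peeling loop:
-- repeatedly cut one width-fitting shelf off the height-sorted list, emit it, drop y by its max height;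
-- same cost, proved to return exactly A's value on all inputs admitted by Pre_.


-- ===== PORT A =====
-- A's loop over the sorted boxes, state (x, y, current_row_max_height, positions).
-- Where Python raises ValueError ("Box doesn't fit"), the port returns the positions
-- accumulated so far; those inputs are excluded by Pre_arrange_boxes_next_fit.
def pvAGo (cw ch : Int) : List (Int × Int) → Int → Int → Int → List (Int × Int) → List (Int × Int)
  | [], _, _, _, pos => pos
  | (w, h) :: rest, x, y, rmax, pos =>
    if x + w ≤ cw then
      pvAGo cw ch rest (x + w) y (max rmax h) (pos ++ [(x, y)])
    else
      if y + rmax + h > ch then pos  -- Python: raise ValueError (excluded by Pre_)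
      else pvAGo cw ch rest w (y + rmax) h (pos ++ [(0, y + rmax)])

def arrange_boxes_next_fit (container_width : Int) (container_height : Int) (boxes : List (Int × Int)) : List (Int × Int) :=
  pvAGo container_width container_height
    (PySem.List.sorted boxes (fun b => b.2) true) 0 0 0 []

-- ===== PORT B =====
-- the inner while loop past the shelf's head box: the following boxes that still fit the width
-- (returned as the shelf tail), and the rest of the list
def pvTake (cw : Int) : List (Int × Int) → Int → (List (Int × Int) × List (Int × Int))
  | [], _ => ([], [])
  | b :: t, x =>
    if x + b.1 ≤ cw then
      let p := pvTake cw t (x + b.1)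
      (b :: p.1, p.2)
    else ([], b :: t)

-- the positions appended for one shelf's boxes (x runs along the row, y is the shelf's y)
def pvEmitRow (y : Int) : List (Int × Int) → Int → List (Int × Int)
  | [], _ => []
  | (w, _) :: rest, x => (x, y) :: pvEmitRow y rest (x + w)

theorem pvTake_snd_length (cw : Int) : ∀ (t : List (Int × Int)) (x : Int), (pvTake cw t x).2.length ≤ t.length := by
  intro t
  induction t with
  | nil => intro x; simp [pvTake]
  | cons b t ih =>
    intro x
    by_cases hc : x + b.1 ≤ cw
    · simp only [pvTake, if_pos hc]
      exact le_trans (ih (x + b.1)) (Nat.le_succ _)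
    · simp [pvTake, hc]

-- the outer while loop: peel one shelf, emit its positions, drop y by its max height.
-- Where Python raises ValueError the port returns the positions so far (excluded by Pre_).
def pvBLoop (cw ch : Int) : List (Int × Int) → Int → List (Int × Int) → List (Int × Int)
  | [], _, pos => pos
  | b :: t, y, pos =>
    let p := pvTake cw t b.1
    let pos' := pos ++ pvEmitRow y (b :: p.1) 0
    let sh := p.1.foldl (fun m q => max m q.2) b.2   -- max(h for _, h in shelf)
    match hp : p.2 with
    | [] => pos'
    | c :: r =>
      if y + sh + c.2 > ch then pos'  -- Python: raise ValueError (excluded by Pre_)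
      else pvBLoop cw ch (c :: r) (y + sh) pos'
  termination_by L => L.length
  decreasing_by
    have := pvTake_snd_length cw t b.1
    rw [hp] at this
    simp at this ⊢
    omega

def arrange_boxes_next_fit_alt (container_width : Int) (container_height : Int) (boxes : List (Int × Int)) : List (Int × Int) :=
  pvBLoop container_width container_height
    (PySem.List.sorted boxes (fun b => b.2) true) 0 []

-- ===== PRECONDITION & SPEC =====
-- Pre_ holds exactly when Python A returns without raising ValueError (the pvFitsGo scan: every
-- row break of the greedy next-fit pass must start its row within the container height — next-fit's
-- success condition is inherently this scan; the fold carries only (row width, y, row height), no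
-- output, and is independent of both ports) AND — excluding inputs A still returns on, outside the
-- natural domain of box dimensions — the nonempty lists in which every box height is negative,
-- where A's first-row height is clamped to 0 by its accumulator's initial value, an artefact.
def pvFitsGo (cw ch : Int) : List (Int × Int) → Int → Int → Int → Bool
  | [], _, _, _ => true
  | (w, h) :: rest, rw, y, rh =>
    if rw + w ≤ cw then pvFitsGo cw ch rest (rw + w) y (max rh h)
    else decide (y + rh + h ≤ ch) && pvFitsGo cw ch rest w (y + rh) h

def Pre_arrange_boxes_next_fit (container_width : Int) (container_height : Int) (boxes : List (Int × Int)) : Prop :=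
  pvFitsGo container_width container_height
    (PySem.List.sorted boxes (fun b => b.2) true) 0 0 0 = true
  ∧ (boxes = [] ∨ ∃ b ∈ boxes, 0 ≤ b.2)

instance (container_width : Int) (container_height : Int) (boxes : List (Int × Int)) : Decidable (Pre_arrange_boxes_next_fit container_width container_height boxes) := by unfold Pre_arrange_boxes_next_fit; infer_instance

def pvWitness_arrange_boxes_next_fit : Int × Int × (List (Int × Int)) := (10, 10, [(3, 2), (4, 5)])

def Spec_arrange_boxes_next_fit (container_width : Int) (container_height : Int) (boxes : List (Int × Int)) (out : List (Int × Int)) : Prop := out = arrange_boxes_next_fit_alt container_width container_height boxes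
instance (container_width : Int) (container_height : Int) (boxes : List (Int × Int)) (out : List (Int × Int)) : Decidable (Spec_arrange_boxes_next_fit container_width container_height boxes out) := by unfold Spec_arrange_boxes_next_fit; infer_instance

-- ===== CLAIM (what is proved, stated in full; the proofs are below) =====
def Claim_equal_arrange_boxes_next_fit : Prop := ∀ (container_width : Int) (container_height : Int) (boxes : List (Int × Int)), Dom_arrange_boxes_next_fit container_width container_height boxes → Pre_arrange_boxes_next_fit container_width container_height boxes → Spec_arrange_boxes_next_fit container_width container_height boxes (arrange_boxes_next_fit container_width container_height boxes)

-- ===== LEMMAS AND PROOFS =====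

-- one step of pvBLoop, written out (avoids the match/let in rewriting)
theorem pvBLoop_cons (cw ch : Int) (b : Int × Int) (t : List (Int × Int)) (y : Int) (pos : List (Int × Int)) :
    pvBLoop cw ch (b :: t) y pos =
      (match (pvTake cw t b.1).2 with
       | [] => pos ++ pvEmitRow y (b :: (pvTake cw t b.1).1) 0
       | c :: r =>
         if y + ((pvTake cw t b.1).1.foldl (fun m q => max m q.2) b.2) + c.2 > ch then
           pos ++ pvEmitRow y (b :: (pvTake cw t b.1).1) 0
         else pvBLoop cw ch (c :: r)
           (y + ((pvTake cw t b.1).1.foldl (fun m q => max m q.2) b.2))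
           (pos ++ pvEmitRow y (b :: (pvTake cw t b.1).1) 0)) := by
  rw [pvBLoop]
  rcases hpt : (pvTake cw t b.1).2 with _ | ⟨c, r⟩ <;> simp

-- mid-row alignment: A's scan from state (x, y, rmax) equals the shelf view of B
theorem pvStep (cw ch : Int) : ∀ (t : List (Int × Int)) (x rmax y : Int) (pos : List (Int × Int)),
    pvAGo cw ch t x y rmax pos =
      (match (pvTake cw t x).2 with
       | [] => pos ++ pvEmitRow y (pvTake cw t x).1 x
       | c :: r =>
         if y + ((pvTake cw t x).1.foldl (fun m q => max m q.2) rmax) + c.2 > ch then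
           pos ++ pvEmitRow y (pvTake cw t x).1 x
         else pvBLoop cw ch (c :: r)
           (y + ((pvTake cw t x).1.foldl (fun m q => max m q.2) rmax))
           (pos ++ pvEmitRow y (pvTake cw t x).1 x)) := by
  intro t
  induction t with
  | nil => intro x rmax y pos; simp [pvAGo, pvTake, pvEmitRow]
  | cons b t ih =>
    obtain ⟨w, h⟩ := b
    intro x rmax y pos
    by_cases hfit : x + w ≤ cw
    · simp only [pvAGo, if_pos hfit, pvTake]
      rw [ih (x + w) (max rmax h) y (pos ++ [(x, y)])]
      simp [pvEmitRow]
    · simp only [pvAGo, pvTake, if_neg hfit]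
      simp only [pvEmitRow, List.foldl_nil, List.append_nil]
      by_cases hover : y + rmax + h > ch
      · simp only [if_pos hover]
      · simp only [if_neg hover]
        rw [ih w h (y + rmax) (pos ++ [(0, y + rmax)])]
        rw [pvBLoop_cons]
        simp [pvEmitRow]

-- row start: A after placing the row's head box b at (0, y) with row max = b.2
theorem pvRow (cw ch : Int) (b : Int × Int) (t : List (Int × Int)) (y : Int) (pos : List (Int × Int)) :
    pvAGo cw ch t b.1 y b.2 (pos ++ [(0, y)]) = pvBLoop cw ch (b :: t) y pos := by
  rw [pvStep, pvBLoop_cons]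
  simp [pvEmitRow]

-- ===== VERDICT =====
theorem arrange_boxes_next_fit_spec : Claim_equal_arrange_boxes_next_fit := by
  intro cw ch boxes _ hpre
  obtain ⟨hfits, hnn⟩ := hpre
  unfold Spec_arrange_boxes_next_fit arrange_boxes_next_fit arrange_boxes_next_fit_alt
  rcases hL : PySem.List.sorted boxes (fun b => b.2) true with _ | ⟨b, t⟩
  · simp [pvAGo, pvBLoop]
  · obtain ⟨w, h⟩ := b
    -- the sorted head's height is the maximum: with some box of nonnegative height, 0 ≤ h
    have hhd : 0 ≤ h := by
      rcases hnn with hnil | ⟨b', hb', hb'2⟩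
      · rw [hnil, (PySem.List.sorted_eq_nil_iff [] _ _).mpr rfl] at hL; cases hL
      · exact le_trans hb'2 (PySem.List.key_head_sorted_rev_ge boxes (fun q => q.2) hL b' hb')
    rw [hL] at hfits
    by_cases hfit : (0 : Int) + w ≤ cw
    · simp only [pvAGo, if_pos hfit]
      have hmax : max 0 h = h := max_eq_right hhd
      rw [hmax]
      have := pvRow cw ch (w, h) t 0 []
      simpa using this
    · -- first box wider than the container: A checks the height here; Pre_ rules out the raise
      simp only [pvFitsGo, if_neg hfit, Bool.and_eq_true, decide_eq_true_eq] at hfits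
      have hok : ¬ ((0 : Int) + 0 + h > ch) := by omega
      simp only [pvAGo, if_neg hfit, if_neg hok]
      have := pvRow cw ch (w, h) t 0 []
      simpa using this
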